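-- pv_equiv track=rewrite | github.com/Ferase/PPMTools | ppmtools/ppm_helpers.py | DecAsc
-- ===== SOURCE A (Python) =====
-- def DecAsc(dec, length = None, LittleEndian = False):
-- 	out = []
-- 	while dec != 0:
-- 		out.insert(0, dec&0xFF)
-- 		dec >>= 8
--
-- 	if length:
-- 		if len(out) > length:
-- 			out = out[-length:]
-- 		if len(out) < length:
-- 			out = [0]*(length-len(out)) + out
--
-- 	if LittleEndian: out.reverse()
-- 	return "".join(map(chr, out))
-- ===== SOURCE B (Python) =====
-- def DecAsc(dec, length = None, LittleEndian = False):
-- 	nbytes = (dec.bit_length() + 7) // 8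
-- 	out = list(dec.to_bytes(nbytes, 'big'))
--
-- 	if length:
-- 		if len(out) > length:
-- 			out = out[-length:]
-- 		if len(out) < length:
-- 			out = [0]*(length-len(out)) + out
--
-- 	if LittleEndian: out.reverse()
-- 	return "".join(map(chr, out))
-- ===== Notes on version B (the rewrite author's own statement) =====
-- stated objective: idiomatic
-- what changed: A's destructive shift-until-zero while loop (insert at front, dec >>= 8) is replaced by computing the byte count from dec.bit_length() and extracting all big-endian bytes at once with int.to_bytes; the padding/truncation/endianness tail is unchanged.
import Mathlib
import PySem

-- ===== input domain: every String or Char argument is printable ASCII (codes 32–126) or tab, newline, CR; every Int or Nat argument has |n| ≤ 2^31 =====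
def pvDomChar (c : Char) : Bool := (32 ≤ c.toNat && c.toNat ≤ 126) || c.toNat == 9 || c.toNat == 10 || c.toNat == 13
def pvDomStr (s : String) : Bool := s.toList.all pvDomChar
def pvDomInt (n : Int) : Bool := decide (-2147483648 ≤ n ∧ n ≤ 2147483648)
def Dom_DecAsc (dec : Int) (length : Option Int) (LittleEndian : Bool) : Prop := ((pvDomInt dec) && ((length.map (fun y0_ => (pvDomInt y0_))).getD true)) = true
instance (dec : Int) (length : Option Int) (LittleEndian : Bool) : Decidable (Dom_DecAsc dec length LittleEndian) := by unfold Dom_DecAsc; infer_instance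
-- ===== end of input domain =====

-- B replaces A's destructive shift-until-zero while loop by computing the byte count
-- from dec.bit_length() and reading the big-endian bytes off at once with
-- int.to_bytes (idiomatic); the padding/truncation/endianness tail is kept verbatim.

-- ===== PORT A =====
-- the 'while dec != 0' loop; for dec < 0 Python never terminates (excluded by Pre_), the port stops there
def DecAscLoop (dec : Int) (out : List Int) : List Int :=
  if dec = 0 then out
  else if dec < 0 then out
  else DecAscLoop (dec >>> (8:Nat)) (PySem.List.insert out 0 (PySem.Int.band dec 0xFF))
termination_by dec.toNat
decreasing_by
  have h1 : dec >>> (8:Nat) = dec / 256 := by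
    rw [Int.shiftRight_eq_div_pow]; norm_num
  omega

-- the tail both Pythons share verbatim: 'if length: …', 'if LittleEndian: …', ''.join(map(chr, out))
def DecAscTail (out0 : List Int) (length : Option Int) (LittleEndian : Bool) : String :=
  let out := match length with
    | none => out0
    | some L =>
      if L = 0 then out0
      else
        let out1 := if (PySem.List.len out0) > L then PySem.List.slice out0 (some (-L)) none else out0
        if (PySem.List.len out1) < L then PySem.List.pyRepeat [(0 : Int)] (L - PySem.List.len out1) ++ out1 else out1
  let out := if LittleEndian then out.reverse else out
  String.ofList (out.map (fun b => Char.ofNat b.toNat))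

def DecAsc (dec : Int) (length : Option Int) (LittleEndian : Bool) : String :=
  DecAscTail (DecAscLoop dec []) length LittleEndian

-- ===== PORT B =====
-- list(dec.to_bytes(nbytes, 'big')) ported by hand: big-endian positional byte
-- extraction; exact for 0 ≤ dec < 256^nbytes (to_bytes raises outside that, which is outside Pre_)
def DecAscBytesBE (dec : Int) (nbytes : Int) : List Int :=
  (PySem.List.pyRange 0 nbytes 1).map
    (fun i => PySem.Int.band (dec >>> (8 * (nbytes - 1 - i)).toNat) 0xFF)

def DecAsc_alt (dec : Int) (length : Option Int) (LittleEndian : Bool) : String :=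
  DecAscTail (DecAscBytesBE dec (PySem.Int.floordiv ((PySem.Int.bitLength dec : Int) + 7) 8)) length LittleEndian

-- ===== PRECONDITION & SPEC =====
-- Pre_ excludes negative dec only: there A's 'while dec != 0' never terminates (dec >>= 8 stalls at -1), so A returns on exactly the inputs Pre_ admits.
def Pre_DecAsc (dec : Int) (length : Option Int) (LittleEndian : Bool) : Prop := 0 ≤ dec
instance (dec : Int) (length : Option Int) (LittleEndian : Bool) : Decidable (Pre_DecAsc dec length LittleEndian) := by unfold Pre_DecAsc; infer_instance
def pvWitness_DecAsc : Int × Option Int × Bool := (258, some 4, true)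

def Spec_DecAsc (dec : Int) (length : Option Int) (LittleEndian : Bool) (out : String) : Prop := out = DecAsc_alt dec length LittleEndian
instance (dec : Int) (length : Option Int) (LittleEndian : Bool) (out : String) : Decidable (Spec_DecAsc dec length LittleEndian out) := by unfold Spec_DecAsc; infer_instance

-- ===== CLAIM (what is proved, stated in full; the proofs are below) =====
def Claim_equal_DecAsc : Prop := ∀ (dec : Int) (length : Option Int) (LittleEndian : Bool), Dom_DecAsc dec length LittleEndian → Pre_DecAsc dec length LittleEndian → Spec_DecAsc dec length LittleEndian (DecAsc dec length LittleEndian)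

-- ===== LEMMAS AND PROOFS =====

-- the big-endian byte list of a natural number, structurally
def natBytes (n : Nat) : List Int :=
  if n = 0 then [] else natBytes (n / 256) ++ [((n % 256 : Nat) : Int)]

theorem shift8_natCast (n : Nat) : ((n : Int) >>> (8:Nat)) = ((n / 256 : Nat) : Int) := by
  rw [Int.shiftRight_eq_div_pow]; norm_num

theorem band255_natCast (n : Nat) : PySem.Int.band (n : Int) 0xFF = ((n % 256 : Nat) : Int) := by
  rw [show (0xFF : Int) = ((255:Nat):Int) from rfl, PySem.Int.band_natCast]
  congr 1
  have := Nat.and_two_pow_sub_one_eq_mod n 8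
  norm_num at this
  omega

theorem decAscLoop_eq_natBytes (n : Nat) (acc : List Int) :
    DecAscLoop (n : Int) acc = natBytes n ++ acc := by
  induction n using Nat.strong_induction_on generalizing acc with
  | _ n ih =>
    rw [DecAscLoop, natBytes]
    by_cases h0 : n = 0
    · simp [h0]
    · have hne : ((n : Int)) ≠ 0 := by exact_mod_cast h0
      have hnlt : ¬ ((n : Int)) < 0 := by simp
      rw [if_neg hne, if_neg hnlt, if_neg h0,
        shift8_natCast, band255_natCast, PySem.List.insert_zero,
        ih (n / 256) (by omega)]
      simp

theorem bitLength_div256 (n : Nat) (h : 256 ≤ n) :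
    PySem.Int.bitLength (n : Int) = PySem.Int.bitLength ((n / 256 : Nat) : Int) + 8 := by
  rw [PySem.Int.bitLength_natCast (m := n) (by omega),
      PySem.Int.bitLength_natCast (m := n / 2) (by omega),
      PySem.Int.bitLength_natCast (m := n / 2 / 2) (by omega),
      PySem.Int.bitLength_natCast (m := n / 2 / 2 / 2) (by omega),
      PySem.Int.bitLength_natCast (m := n / 2 / 2 / 2 / 2) (by omega),
      PySem.Int.bitLength_natCast (m := n / 2 / 2 / 2 / 2 / 2) (by omega),
      PySem.Int.bitLength_natCast (m := n / 2 / 2 / 2 / 2 / 2 / 2) (by omega),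
      PySem.Int.bitLength_natCast (m := n / 2 / 2 / 2 / 2 / 2 / 2 / 2) (by omega)]
  have : n / 2 / 2 / 2 / 2 / 2 / 2 / 2 / 2 = n / 256 := by omega
  rw [this]

theorem bytesBE_natCast_eq_natBytes (n : Nat) :
    DecAscBytesBE (n : Int) ((((PySem.Int.bitLength (n : Int)) + 7) / 8 : Nat) : Int) = natBytes n := by
  induction n using Nat.strong_induction_on with
  | _ n ih =>
    by_cases h0 : n = 0
    · subst h0
      simp [DecAscBytesBE, natBytes, PySem.Int.bitLength_zero, PySem.List.pyRange_one_eq_nil]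
    · by_cases hs : n < 256
      · -- one byte
        have hbl1 : 1 ≤ PySem.Int.bitLength (n : Int) := by
          by_contra hb
          simp at hb
          have h2 := PySem.Int.lt_two_pow_bitLength ((n : Nat) : Int)
          rw [hb] at h2
          simp at h2
          exact h0 h2
        have hbl8 : PySem.Int.bitLength (n : Int) ≤ 8 := by
          by_contra hb
          have h2 := PySem.Int.two_pow_bitLength_le ((n : Nat) : Int) (by exact_mod_cast h0)
          have h3 : (2:Nat) ^ 8 ≤ 2 ^ (PySem.Int.bitLength ((n : Nat) : Int) - 1) :=
            Nat.pow_le_pow_right (by omega) (by omega)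
          norm_num at h3
          simp at h2
          omega
        have hnb : ((PySem.Int.bitLength (n : Int)) + 7) / 8 = 1 := by omega
        rw [hnb, natBytes, if_neg h0, natBytes, if_pos (by omega : n / 256 = 0)]
        show (PySem.List.pyRange 0 ((1:Nat):Int) 1).map _ = _
        rw [show (((1:Nat)):Int) = (0:Int) + 1 from rfl, PySem.List.pyRange_one_succ_right (by omega),
            PySem.List.pyRange_one_eq_nil (by omega)]
        simp only [List.nil_append, List.map_cons, List.map_nil]
        norm_num
        rw [band255_natCast]
        push_cast
        omega
      · -- n ≥ 256
        have hm : n / 256 < n := by omega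
        have hm0 : n / 256 ≠ 0 := by omega
        have hbl := bitLength_div256 n (by omega)
        have hnb : ((PySem.Int.bitLength (n : Int)) + 7) / 8
            = ((PySem.Int.bitLength ((n / 256 : Nat) : Int)) + 7) / 8 + 1 := by omega
        rw [hnb]
        set k : Nat := ((PySem.Int.bitLength ((n / 256 : Nat) : Int)) + 7) / 8 with hk
        rw [natBytes, if_neg h0, ← ih (n / 256) hm]
        unfold DecAscBytesBE
        rw [show (((k + 1 : Nat)):Int) = ((k:Nat):Int) + 1 by push_cast; ring,
            PySem.List.pyRange_one_succ_right (by positivity), List.map_append]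
        congr 1
        · -- the first k bytes are the bytes of n / 256
          rw [PySem.List.pyRange_one]
          simp only [List.map_map]
          apply List.map_congr_left
          intro j hj
          simp only [List.mem_range] at hj
          simp only [Function.comp_apply, zero_add]
          have h1 : (8 * (((k:Nat):Int) + 1 - 1 - (j:Int))).toNat
              = 8 + (8 * (((k:Nat):Int) - 1 - (j:Int))).toNat := by omega
          rw [h1, Int.shiftRight_add, shift8_natCast]
        · -- the last byte is n % 256
          simp only [List.map_cons, List.map_nil]
          have h1 : (8 * (((k:Nat):Int) + 1 - 1 - ((k:Nat):Int))).toNat = 0 := by omega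
          rw [h1, show ((n:Int) >>> (0:Nat)) = (n:Int) by rw [Int.shiftRight_eq_div_pow]; norm_num]
          rw [band255_natCast]

-- ===== VERDICT (by name: the statement is the Claim_ definition above) =====
theorem DecAsc_spec : Claim_equal_DecAsc := by
  intro dec length LittleEndian _ hpre
  unfold Spec_DecAsc DecAsc DecAsc_alt
  obtain ⟨n, rfl⟩ := Int.eq_ofNat_of_zero_le hpre
  rw [decAscLoop_eq_natBytes, List.append_nil,
      show ((PySem.Int.bitLength ((n:Nat) : Int) : Int) + 7)
        = (((PySem.Int.bitLength ((n:Nat) : Int) + 7 : Nat)) : Int) by push_cast; ring,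
      show (8:Int) = ((8:Nat):Int) from rfl, PySem.Int.floordiv_natCast,
      bytesBE_natCast_eq_natBytes]
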